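-- pv_equiv track=rewrite | github.com/Lamriji2022/TFECCSA4BC | ECDSA.py | naf
-- ===== SOURCE A (Python) =====
-- def naf(k):
--     Naf = []
--     i=0
--     while k>0:
--         if k%2 == 1:
--             Naf.append(2 - k%4)
--             k = k - Naf[i]
--         else:
--             Naf.append(0)
--         k = k//2
--         i = i+1
--     return Naf
-- ===== SOURCE B (Python) =====
-- def naf(k):
--     if k <= 0:
--         return []
--     h = 3 * k
--     return [((h >> p) & 1) - ((k >> p) & 1) for p in range(1, h.bit_length())]
-- ===== Notes on version B (the rewrite author's own statement) =====
-- stated objective: alternative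
-- what changed: Replaces A's greedy loop that destructively recodes k (append 2-k%4, subtract, halve) with the closed-form bitwise identity: the NAF digit at each position equals the next-higher bit of 3k minus that bit of k, emitted by a single list comprehension over the bit positions of 3k.
import Mathlib
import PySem

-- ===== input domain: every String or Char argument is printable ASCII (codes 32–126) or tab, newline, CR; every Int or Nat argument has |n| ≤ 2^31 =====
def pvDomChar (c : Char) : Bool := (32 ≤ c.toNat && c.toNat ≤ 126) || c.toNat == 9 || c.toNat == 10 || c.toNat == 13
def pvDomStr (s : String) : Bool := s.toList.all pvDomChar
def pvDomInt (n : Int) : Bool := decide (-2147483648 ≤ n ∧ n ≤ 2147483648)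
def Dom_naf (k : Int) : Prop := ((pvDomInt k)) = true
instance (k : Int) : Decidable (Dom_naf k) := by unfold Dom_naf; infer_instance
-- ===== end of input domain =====

-- B replaces A's greedy in-place recoding loop by the closed-form bitwise identity
-- "NAF digit p = bit (p+1) of 3k minus bit (p+1) of k" (objective: alternative algorithm).

-- ===== PORT A =====
-- A's while loop, with an explicit fuel guard making the same computation total:
-- each iteration strictly decreases k.toNat, so k.toNat + 1 iterations always suffice
-- (proved in loopA_eq below).  Naf[i] read right after Naf.append(2 - k%4) is that
-- just-appended digit (i = len(Naf) - 1 there), so the loop subtracts d := 2 - k%4.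
def nafLoopA (fuel : Nat) (k : Int) (acc : List Int) (i : Int) : List Int :=
  match fuel with
  | 0 => acc
  | fuel + 1 =>
    if 0 < k then
      if PySem.Int.mod k 2 = 1 then
        nafLoopA fuel (PySem.Int.floordiv (k - (2 - PySem.Int.mod k 4)) 2)
          (acc ++ [2 - PySem.Int.mod k 4]) (i + 1)
      else
        nafLoopA fuel (PySem.Int.floordiv k 2) (acc ++ [0]) (i + 1)
    else acc

def naf (k : Int) : List Int := nafLoopA (k.toNat + 1) k [] 0

-- ===== PORT B =====
def naf_alt (k : Int) : List Int :=
  if k ≤ 0 then []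
  else
    let h := 3 * k
    -- p ranges over 1 .. h.bit_length()-1; p ≥ 1 so p.toNat is exact for the shift amount
    (PySem.List.pyRange 1 (PySem.Int.bitLength h : Nat) 1).map
      (fun p => PySem.Int.band (h >>> p.toNat) 1 - PySem.Int.band (k >>> p.toNat) 1)

-- ===== PRECONDITION & SPEC =====
def Spec_naf (k : Int) (out : List Int) : Prop := out = naf_alt k
instance (k : Int) (out : List Int) : Decidable (Spec_naf k out) := by unfold Spec_naf; infer_instance

-- ===== CLAIM (what is proved, stated in full; the proofs are below) =====
def Claim_equal_naf : Prop := ∀ (k : Int), Dom_naf k → Spec_naf k (naf k)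

-- ===== LEMMAS AND PROOFS =====

-- signed bit p of n, as an integer 0/1
def tb (n p : Nat) : Int := if n.testBit p then 1 else 0

-- Python bit_length of a natural number
def BL (n : Nat) : Nat := PySem.Int.bitLength (n : Int)

-- the common specification: digits of 3n minus digits of n, positions 1 .. bitlen(3n)-1
def nafSpecN (n : Nat) : List Int :=
  (List.range' 1 (BL (3 * n) - 1)).map (fun p => tb (3 * n) p - tb n p)

theorem nafR_term_half (n : Nat) (h0 : ¬ n = 0) : n / 2 < n := Nat.div_lt_self (by omega) one_lt_two

theorem nafR_term_half1 (n : Nat) (h1 : ¬ n % 2 = 0) (h2 : ¬ n % 4 = 1) : n / 2 + 1 < n := by omega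

-- clean recursion equivalent to A's loop body
def nafRecN (n : Nat) : List Int :=
  if h0 : n = 0 then []
  else if h1 : n % 2 = 0 then 0 :: nafRecN (n / 2)
  else if h2 : n % 4 = 1 then 1 :: nafRecN (n / 2)
  else -1 :: nafRecN (n / 2 + 1)
termination_by n
decreasing_by
  · exact nafR_term_half n h0
  · exact nafR_term_half n h0
  · exact nafR_term_half1 n h1 h2

theorem tb_succ (x j : Nat) : tb x (j + 1) = tb (x / 2) j := by
  simp [tb, Nat.testBit_add_one]

theorem tb_zero (x : Nat) : tb x 0 = if x % 2 = 1 then 1 else 0 := by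
  simp [tb, Nat.testBit_zero]

-- bit-length characterisation via the PySem power bounds
theorem BL_lt (n : Nat) : n < 2 ^ BL n := by
  have h := PySem.Int.lt_two_pow_bitLength (n : Int)
  simpa [BL] using h

theorem BL_le (n : Nat) (h : n ≠ 0) : 2 ^ (BL n - 1) ≤ n := by
  have h' := PySem.Int.two_pow_bitLength_le (n : Int) (by exact_mod_cast h)
  simpa [BL] using h'

theorem BL_eq (n b : Nat) (h1 : 2 ^ b ≤ n) (h2 : n < 2 ^ (b + 1)) : BL n = b + 1 := by
  have hn : n ≠ 0 := by have := Nat.one_le_two_pow (n := b); omega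
  have hlt := BL_lt n
  have hle := BL_le n hn
  have hb1 : b < BL n := by
    by_contra hc
    have : 2 ^ (BL n) ≤ 2 ^ b := Nat.pow_le_pow_right (by norm_num) (by omega)
    omega
  have hb2 : BL n - 1 < b + 1 := by
    by_contra hc
    have : 2 ^ (b + 1) ≤ 2 ^ (BL n - 1) := Nat.pow_le_pow_right (by norm_num) (by omega)
    omega
  omega

theorem BL_double (m : Nat) (h : 0 < m) : BL (2 * m) = BL m + 1 := by
  have hm : m ≠ 0 := by omega
  have h1 := BL_le m hm
  have h2 := BL_lt m
  have hb : 1 ≤ BL m := by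
    rcases Nat.eq_zero_or_pos (BL m) with h0 | h0
    · rw [h0] at h2; simp at h2; omega
    · exact h0
  have e : 2 ^ BL m = 2 * 2 ^ (BL m - 1) := by
    rw [← pow_succ']; congr 1; omega
  have := BL_eq (2 * m) (BL m) (by omega) (by rw [pow_succ]; omega)
  omega

theorem BL_S2 (m : Nat) (h : 0 < m) : BL (12 * m + 3) = BL (6 * m) + 1 := by
  have h1 := BL_le (6 * m) (by omega)
  have h2 := BL_lt (6 * m)
  have hb : 3 ≤ BL (6 * m) := by
    by_contra hc
    have : 2 ^ BL (6 * m) ≤ 2 ^ 2 := Nat.pow_le_pow_right (by norm_num) (by omega)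
    omega
  have e : 2 ^ BL (6 * m) = 2 * 2 ^ (BL (6 * m) - 1) := by
    rw [← pow_succ']; congr 1; omega
  have hd4 : 4 ∣ 2 ^ (BL (6 * m) + 1) := by
    have : (2:Nat) ^ 2 ∣ 2 ^ (BL (6 * m) + 1) := Nat.pow_dvd_pow 2 (by omega)
    simpa using this
  have := BL_eq (12 * m + 3) (BL (6 * m)) (by omega) (by rw [pow_succ]; omega)
  omega

theorem BL_S3 (m : Nat) : BL (12 * m + 9) = BL (6 * m + 6) + 1 := by
  have h1 := BL_le (6 * m + 6) (by omega)
  have h2 := BL_lt (6 * m + 6)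
  have hb : 3 ≤ BL (6 * m + 6) := by
    by_contra hc
    have : 2 ^ BL (6 * m + 6) ≤ 2 ^ 2 := Nat.pow_le_pow_right (by norm_num) (by omega)
    omega
  have e : 2 ^ BL (6 * m + 6) = 2 * 2 ^ (BL (6 * m + 6) - 1) := by
    conv_lhs => rw [show BL (6 * m + 6) = BL (6 * m + 6) - 1 + 1 by omega]
    rw [pow_succ']
  have hd4 : 4 ∣ 2 ^ BL (6 * m + 6) := by
    have : (2:Nat) ^ 2 ∣ 2 ^ BL (6 * m + 6) := Nat.pow_dvd_pow 2 (by omega)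
    simpa using this
  have hd3 : ¬ (3 ∣ 2 ^ BL (6 * m + 6)) := by
    intro hd
    have := Nat.Prime.dvd_of_dvd_pow (p := 3) (m := 2) Nat.prime_three hd
    omega
  have := BL_eq (12 * m + 9) (BL (6 * m + 6)) (by omega) (by rw [pow_succ]; omega)
  omega

-- the carry lemma
theorem carryL (m : Nat) : ∀ j, tb (3 * m + 2) j - tb m j = tb (3 * m + 3) j - tb (m + 1) j := by
  induction m using Nat.strong_induction_on with
  | _ m ih =>
    intro j
    rcases Nat.mod_two_eq_zero_or_one m with hp | hp
    · -- m = 2*y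
      have hy : m = 2 * (m / 2) := by omega
      cases j with
      | zero =>
        rw [tb_zero, tb_zero, tb_zero, tb_zero]
        split_ifs <;> omega
      | succ q =>
        rw [tb_succ, tb_succ, tb_succ, tb_succ]
        have e1 : (3 * m + 2) / 2 = 3 * (m / 2) + 1 := by omega
        have e3 : (3 * m + 3) / 2 = 3 * (m / 2) + 1 := by omega
        have e4 : (m + 1) / 2 = m / 2 := by omega
        rw [e1, e3, e4]
    · -- m = 2*y + 1
      have hy : m = 2 * (m / 2) + 1 := by omega
      cases j with
      | zero =>
        rw [tb_zero, tb_zero, tb_zero, tb_zero]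
        split_ifs <;> omega
      | succ q =>
        rw [tb_succ, tb_succ, tb_succ, tb_succ]
        have e1 : (3 * m + 2) / 2 = 3 * (m / 2) + 2 := by omega
        have e2 : (3 * m + 3) / 2 = 3 * (m / 2) + 3 := by omega
        have e3 : (m + 1) / 2 = m / 2 + 1 := by omega
        rw [e1, e2, e3]
        exact ih (m / 2) (by omega) q

theorem BL_pos (n : Nat) (h : 0 < n) : 1 ≤ BL n := by
  have h2 := BL_lt n
  by_contra hc
  have hbl : BL n = 0 := by omega
  rw [hbl] at h2
  simp at h2
  omega

theorem map_range'_succ (f : Nat → Int) (L : Nat) :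
    (List.range' 1 (L + 1)).map f = f 1 :: (List.range' 1 L).map (fun p => f (p + 1)) := by
  rw [List.range'_succ, List.map_cons, List.range'_succ_left, List.map_map]
  rfl

-- case lemmas for the spec
theorem spec_even (m : Nat) (h : 0 < m) : nafSpecN (2 * m) = 0 :: nafSpecN m := by
  have hBL : BL (3 * (2 * m)) = BL (3 * m) + 1 := by
    rw [show 3 * (2 * m) = 2 * (3 * m) by ring]; exact BL_double (3 * m) (by omega)
  have hge : 1 ≤ BL (3 * m) := BL_pos _ (by omega)
  unfold nafSpecN
  rw [hBL, show BL (3 * m) + 1 - 1 = (BL (3 * m) - 1) + 1 by omega, map_range'_succ]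
  congr 1
  · rw [show (1 : Nat) = 0 + 1 from rfl]
    simp only [tb_succ]
    rw [show 3 * (2 * m) / 2 = 3 * m by omega, show 2 * m / 2 = m by omega,
      tb_zero, tb_zero]
    split_ifs <;> omega
  · apply List.map_congr_left
    intro p hp
    simp only [tb_succ]
    rw [show 3 * (2 * m) / 2 = 3 * m by omega, show 2 * m / 2 = m by omega]

theorem spec_one (m : Nat) : nafSpecN (4 * m + 1) = 1 :: nafSpecN (2 * m) := by
  rcases Nat.eq_zero_or_pos m with rfl | hm
  · decide
  · have hBL : BL (3 * (4 * m + 1)) = BL (3 * (2 * m)) + 1 := by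
      rw [show 3 * (4 * m + 1) = 12 * m + 3 by ring, show 3 * (2 * m) = 6 * m by ring]
      exact BL_S2 m hm
    have hge : 1 ≤ BL (3 * (2 * m)) := BL_pos _ (by omega)
    unfold nafSpecN
    rw [hBL, show BL (3 * (2 * m)) + 1 - 1 = (BL (3 * (2 * m)) - 1) + 1 by omega,
      map_range'_succ]
    congr 1
    · rw [show (1 : Nat) = 0 + 1 from rfl]
      simp only [tb_succ]
      rw [show 3 * (4 * m + 1) / 2 = 6 * m + 1 by omega,
        show (4 * m + 1) / 2 = 2 * m by omega, tb_zero, tb_zero]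
      split_ifs <;> omega
    · apply List.map_congr_left
      intro p hp
      obtain ⟨q, rfl⟩ : ∃ q, p = q + 1 := ⟨p - 1, by have := List.mem_range'_1.mp hp; omega⟩
      simp only [tb_succ]
      rw [show 3 * (4 * m + 1) / 2 / 2 = 3 * m by omega,
        show (4 * m + 1) / 2 / 2 = m by omega,
        show 3 * (2 * m) / 2 = 3 * m by omega,
        show 2 * m / 2 = m by omega]

theorem spec_three (m : Nat) : nafSpecN (4 * m + 3) = -1 :: nafSpecN (2 * m + 2) := by
  have hBL : BL (3 * (4 * m + 3)) = BL (3 * (2 * m + 2)) + 1 := by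
    rw [show 3 * (4 * m + 3) = 12 * m + 9 by ring, show 3 * (2 * m + 2) = 6 * m + 6 by ring]
    exact BL_S3 m
  have hge : 1 ≤ BL (3 * (2 * m + 2)) := BL_pos _ (by omega)
  unfold nafSpecN
  rw [hBL, show BL (3 * (2 * m + 2)) + 1 - 1 = (BL (3 * (2 * m + 2)) - 1) + 1 by omega,
    map_range'_succ]
  congr 1
  · rw [show (1 : Nat) = 0 + 1 from rfl]
    simp only [tb_succ]
    rw [show 3 * (4 * m + 3) / 2 = 6 * m + 4 by omega,
      show (4 * m + 3) / 2 = 2 * m + 1 by omega, tb_zero, tb_zero]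
    split_ifs <;> omega
  · apply List.map_congr_left
    intro p hp
    obtain ⟨q, rfl⟩ : ∃ q, p = q + 1 := ⟨p - 1, by have := List.mem_range'_1.mp hp; omega⟩
    simp only [tb_succ]
    rw [show 3 * (4 * m + 3) / 2 / 2 = 3 * m + 2 by omega,
      show (4 * m + 3) / 2 / 2 = m by omega,
      show 3 * (2 * m + 2) / 2 = 3 * m + 3 by omega,
      show (2 * m + 2) / 2 = m + 1 by omega]
    exact carryL m q

theorem rec_eq_spec (n : Nat) : nafRecN n = nafSpecN n := by
  induction n using Nat.strong_induction_on with
  | _ n ih =>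
    rw [nafRecN]
    split_ifs with h0 h1 h2
    · subst h0; decide
    · have hn : n = 2 * (n / 2) := by omega
      rw [ih (n / 2) (by omega)]
      conv_rhs => rw [hn]
      rw [spec_even (n / 2) (by omega)]
    · have hn : n = 4 * (n / 4) + 1 := by omega
      have h2' : n / 2 = 2 * (n / 4) := by omega
      rw [ih (n / 2) (by omega), h2']
      conv_rhs => rw [hn]
      rw [spec_one (n / 4)]
    · have h3 : n % 4 = 3 := by omega
      have hn : n = 4 * (n / 4) + 3 := by omega
      have h2' : n / 2 + 1 = 2 * (n / 4) + 2 := by omega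
      rw [ih (n / 2 + 1) (by omega), h2']
      conv_rhs => rw [hn]
      rw [spec_three (n / 4)]

theorem pymod2 (k : Int) : PySem.Int.mod k 2 = k % 2 := by
  show k.fmod 2 = k % 2
  rw [Int.fmod_eq_emod]; norm_num

theorem pymod4 (k : Int) : PySem.Int.mod k 4 = k % 4 := by
  show k.fmod 4 = k % 4
  rw [Int.fmod_eq_emod]; norm_num

theorem pydiv2 (a : Int) : PySem.Int.floordiv a 2 = a / 2 := by
  show a.fdiv 2 = a / 2
  rw [Int.fdiv_eq_ediv]; norm_num

theorem loopA_eq (fuel : Nat) : ∀ (k : Int) (acc : List Int) (i : Int), k.toNat < fuel →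
    nafLoopA fuel k acc i = acc ++ nafRecN k.toNat := by
  induction fuel with
  | zero => intro k acc i h; exact absurd h (by omega)
  | succ fuel ih =>
    intro k acc i hf
    simp only [nafLoopA, pymod2, pymod4, pydiv2]
    by_cases hk : 0 < k
    · rw [if_pos hk]
      by_cases ho : k % 2 = 1
      · rw [if_pos ho]
        rcases (by omega : k % 4 = 1 ∨ k % 4 = 3) with h4 | h4
        · rw [h4, ih _ _ _ (by omega), show ((k - (2 - 1)) / 2).toNat = k.toNat / 2 by omega]
          conv_rhs => rw [nafRecN]
          rw [dif_neg (by omega), dif_neg (by omega), dif_pos (by omega)]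
          simp
        · rw [h4, ih _ _ _ (by omega), show ((k - (2 - 3)) / 2).toNat = k.toNat / 2 + 1 by omega]
          conv_rhs => rw [nafRecN]
          rw [dif_neg (by omega), dif_neg (by omega), dif_neg (by omega)]
          norm_num
      · rw [if_neg ho, ih _ _ _ (by omega), show (k / 2).toNat = k.toNat / 2 by omega]
        conv_rhs => rw [nafRecN]
        rw [dif_neg (by omega), dif_pos (by omega)]
        simp
    · rw [if_neg hk]
      rw [show k.toNat = 0 by omega, nafRecN]
      simp

theorem band_shift_tb (x q : Nat) : PySem.Int.band ((x : Int) >>> ((q : Nat) : Int)) 1 = tb x q := by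
  have h1 : ((x : Int) >>> ((q : Nat) : Int)) = ((x >>> q : Nat) : Int) := by
    simp [Int.shiftRight_eq, Int.natCast_shiftRight]
  rw [h1, show (1 : Int) = ((1 : Nat) : Int) from rfl, PySem.Int.band_natCast,
    Nat.and_one_is_mod, Nat.shiftRight_eq_div_pow]
  rw [tb, Nat.testBit_eq_decide_div_mod_eq]
  rcases Nat.mod_two_eq_zero_or_one (x / 2 ^ q) with hm | hm <;> simp [hm]

theorem alt_eq_spec (k : Int) (h : 0 < k) : naf_alt k = nafSpecN k.toNat := by
  have hnle : ¬ k ≤ 0 := by omega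
  rw [naf_alt, if_neg hnle]
  show (PySem.List.pyRange 1 ((PySem.Int.bitLength (3 * k) : Nat) : Int) 1).map
      (fun p => PySem.Int.band ((3 * k) >>> p.toNat) 1 - PySem.Int.band (k >>> p.toNat) 1)
      = nafSpecN k.toNat
  obtain ⟨n, rfl⟩ : ∃ n : Nat, k = (n : Int) := ⟨k.toNat, by omega⟩
  have hc : (3 : Int) * (n : Int) = ((3 * n : Nat) : Int) := by push_cast; ring
  rw [hc, Int.toNat_natCast]
  show (PySem.List.pyRange 1 ((BL (3 * n) : Nat) : Int) 1).map
      (fun p => PySem.Int.band (((3 * n : Nat) : Int) >>> p.toNat) 1 -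
        PySem.Int.band (((n : Nat) : Int) >>> p.toNat) 1)
      = nafSpecN n
  rw [nafSpecN, PySem.List.pyRange_one, List.range'_eq_map_range, List.map_map, List.map_map]
  rw [show (((BL (3 * n) : Nat) : Int) - 1).toNat = BL (3 * n) - 1 by omega]
  apply List.map_congr_left
  intro j hj
  simp only [Function.comp]
  rw [show ((1 : Int) + (j : Nat)).toNat = j + 1 by omega, band_shift_tb, band_shift_tb,
    show 1 + j = j + 1 by omega]

-- ===== VERDICT (by name: the statement is the Claim_ definition above) =====
theorem naf_spec : Claim_equal_naf := by
  intro k _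
  show naf k = naf_alt k
  by_cases hk : 0 < k
  · rw [naf, loopA_eq _ _ _ _ (by omega), alt_eq_spec k hk, rec_eq_spec, List.nil_append]
  · rw [naf, loopA_eq _ _ _ _ (by omega), show k.toNat = 0 by omega, naf_alt,
      if_pos (by omega), nafRecN]
    simp
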